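-- pv_equiv track=rewrite | github.com/jayluxferro/resilient-write | src/resilient_write/risk_score.py | _size_metrics
-- ===== SOURCE A (Python) =====
-- def _size_metrics(content: str) -> dict[str, int]:
--     line_count = content.count("\n") + (0 if content.endswith("\n") else 1)
--     if content == "":
--         line_count = 0
--     # Longest line by character count.
--     max_line_len = 0
--     start = 0
--     for i, ch in enumerate(content):
--         if ch == "\n":
--             ln = i - start
--             if ln > max_line_len:
--                 max_line_len = ln
--             start = i + 1
--     tail = len(content) - start
--     if tail > max_line_len:
--         max_line_len = tail
--     total_bytes = len(content.encode("utf-8"))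
--     return {
--         "total_bytes": total_bytes,
--         "max_line_len": max_line_len,
--         "line_count": line_count,
--     }
-- ===== SOURCE B (Python) =====
-- def _size_metrics(content: str) -> dict[str, int]:
--     lines = content.split("\n") if content else []
--     if lines and lines[-1] == "":
--         lines.pop()  # drop the empty piece after a trailing newline
--     max_line_len = max(map(len, lines), default=0)
--     total_bytes = len(content.encode("utf-8"))
--     return {
--         "total_bytes": total_bytes,
--         "max_line_len": max_line_len,
--         "line_count": len(lines),
--     }
-- ===== Notes on version B (the rewrite author's own statement) =====
-- stated objective: simpler
-- what changed: B splits the content once on the newline separator, pops the empty trailing piece, and derives line_count as len(lines) and max_line_len as a max over the materialized lines, replacing A's manual character scan with start/tail index bookkeeping and its count()+endswith() line formula.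
import Mathlib
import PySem

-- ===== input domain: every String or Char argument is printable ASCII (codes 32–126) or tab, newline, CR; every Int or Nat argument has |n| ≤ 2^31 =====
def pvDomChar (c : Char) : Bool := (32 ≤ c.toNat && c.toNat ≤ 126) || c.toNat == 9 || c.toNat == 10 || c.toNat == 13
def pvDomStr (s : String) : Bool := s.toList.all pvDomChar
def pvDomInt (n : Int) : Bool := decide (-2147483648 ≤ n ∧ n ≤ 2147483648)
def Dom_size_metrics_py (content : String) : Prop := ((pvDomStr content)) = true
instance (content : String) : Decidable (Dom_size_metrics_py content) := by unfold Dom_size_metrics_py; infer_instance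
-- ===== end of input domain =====

-- B replaces A's manual character scan with index bookkeeping by split-on-newline,
-- drop-trailing-empty-piece, and a max/len reduction over the materialized lines (objective: simpler).

-- len(content.encode("utf-8")): hand port, exact per code point (Python's UTF-8 byte
-- width of each scalar value; Lean Char excludes surrogates, as does a Python str).
-- Shared by both ports (both Pythons call the same builtin expression).
def pyEncodeUtf8Len (cs : List Char) : Int :=
  (cs.map (fun c => if c.toNat < 128 then (1 : Int)
                    else if c.toNat < 2048 then 2
                    else if c.toNat < 65536 then 3 else 4)).sum

-- ===== PORT A =====
def size_metrics_py (content : String) : List (String × Int) :=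
  let cs := content.toList
  let lineCount0 : Int :=
    (PySem.Str.count content "\n" : Int) + (if PySem.Str.endswith content "\n" then 0 else 1)
  let lineCount : Int := if content = "" then 0 else lineCount0
  -- for i, ch in enumerate(content): track (max_line_len, start)
  let p := (PySem.List.enumerate cs).foldl
    (fun (acc : Int × Int) (q : Int × Char) =>
      if q.2 = '\n' then
        (if q.1 - acc.2 > acc.1 then q.1 - acc.2 else acc.1, q.1 + 1)
      else acc) (0, 0)
  let tail : Int := PySem.Str.len content - p.2
  let maxLineLen : Int := if tail > p.1 then tail else p.1
  [("total_bytes", pyEncodeUtf8Len cs),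
   ("max_line_len", maxLineLen),
   ("line_count", lineCount)]

-- ===== PORT B =====
def size_metrics_py_alt (content : String) : List (String × Int) :=
  let lines0 : List (List Char) :=
    if content = "" then [] else PySem.Chars.splitOn content.toList "\n".toList
  -- if lines and lines[-1] == "": lines.pop()
  let lines : List (List Char) :=
    if lines0 ≠ [] ∧ lines0.getLastD [] = [] then lines0.dropLast else lines0
  -- max(map(len, lines), default=0): Python's max over an iterator, ported as a left fold with ⊔
  let maxLineLen : Int := lines.foldl (fun m l => max m (l.length : Int)) 0
  [("total_bytes", pyEncodeUtf8Len content.toList),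
   ("max_line_len", maxLineLen),
   ("line_count", (lines.length : Int))]

-- ===== PRECONDITION & SPEC =====
def Spec_size_metrics_py (content : String) (out : List (String × Int)) : Prop := out = size_metrics_py_alt content
instance (content : String) (out : List (String × Int)) : Decidable (Spec_size_metrics_py content out) := by unfold Spec_size_metrics_py; infer_instance

-- ===== CLAIM (what is proved, stated in full; the proofs are below) =====
def Claim_equal_size_metrics_py : Prop := ∀ (content : String), Dom_size_metrics_py content → Spec_size_metrics_py content (size_metrics_py content)

-- ===== LEMMAS AND PROOFS =====

-- max of a list of ints, base 0
def imax (xs : List Int) : Int := xs.foldr max 0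

theorem imax_nonneg (xs : List Int) : 0 ≤ imax xs := by
  induction xs with
  | nil => simp [imax]
  | cons x t ih => simp [imax] at ih ⊢; omega

theorem imax_append_zero (xs : List Int) : imax (xs ++ [0]) = imax xs := by
  induction xs with
  | nil => simp [imax]
  | cons x t ih =>
    simp only [imax, List.cons_append, List.foldr_cons] at ih ⊢
    omega

-- Chars.count.go counts newline occurrences
theorem count_go_newline (l : List Char) : ∀ (fuel acc : Nat), l.length ≤ fuel →
    PySem.Chars.count.go ['\n'] fuel l acc = acc + l.countP (· == '\n') := by
  induction l with
  | nil => intro fuel acc _; cases fuel <;> rfl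
  | cons c t ih =>
    intro fuel acc h
    cases fuel with
    | zero => simp at h
    | succ f =>
      by_cases hc : c = '\n'
      · subst hc
        rw [PySem.Chars.count.go]
        simp only [List.isPrefixOf, BEq.rfl, Bool.true_and, if_true,
          List.length_singleton, List.drop_one, List.tail_cons]
        rw [ih f (acc + 1) (by simpa using h)]
        simp
        omega
      · rw [PySem.Chars.count.go]
        have hpre : ['\n'].isPrefixOf (c :: t) = false := by
          simp [List.isPrefixOf]; exact fun h' => (hc h'.symm).elim
        rw [hpre]
        simp only [if_false, Bool.false_eq_true]
        rw [ih f acc (by simpa using h)]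
        simp [hc]

theorem str_count_newline (s : String) :
    PySem.Str.count s "\n" = s.toList.countP (· == '\n') := by
  have : PySem.Str.count s "\n" = PySem.Chars.count s.toList ['\n'] := by
    simp [PySem.Str.count_eq]
  rw [this, PySem.Chars.count]
  simp only [List.isEmpty_cons, if_false, Bool.false_eq_true]
  simpa using count_go_newline s.toList s.toList.length 0 (le_refl _)

-- endswith "\n" means the last character is a newline
theorem endswith_newline (s : String) :
    PySem.Str.endswith s "\n" = true ↔ s.toList.getLast? = some '\n' := by
  have h1 : PySem.Str.endswith s "\n" = true ↔ ['\n'] <:+ s.toList := by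
    simp [PySem.Str.endswith_eq, PySem.Chars.endswith_iff]
  rw [h1, List.getLast?_eq_some_iff]
  constructor
  · rintro ⟨l, hl⟩; exact ⟨l, hl.symm⟩
  · rintro ⟨l, hl⟩; exact ⟨l, hl.symm⟩

-- Chars.splitOn on a single-character separator is List.splitOnP
theorem splitOn_go_newline (l : List Char) : ∀ (fuel : Nat) (cur : List Char) (acc : List (List Char)),
    l.length ≤ fuel →
    PySem.Chars.splitOn.go ['\n'] fuel l cur acc =
      acc.reverse ++ (l.splitOnP (· == '\n')).modifyHead (cur.reverse ++ ·) := by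
  induction l with
  | nil =>
    intro fuel cur acc _
    cases fuel <;> simp [PySem.Chars.splitOn.go, List.splitOnP_nil]
  | cons c t ih =>
    intro fuel cur acc h
    cases fuel with
    | zero => simp at h
    | succ f =>
      by_cases hc : c = '\n'
      · subst hc
        rw [PySem.Chars.splitOn.go]
        simp only [List.isPrefixOf, BEq.rfl, Bool.true_and, if_true,
          List.length_singleton, List.drop_one, List.tail_cons]
        rw [ih f [] (cur.reverse :: acc) (by simpa using h)]
        rw [List.splitOnP_cons]
        have hne : t.splitOnP (· == '\n') ≠ [] := List.splitOnP_ne_nil _ _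
        obtain ⟨a, r, hr⟩ := List.exists_cons_of_ne_nil hne
        simp [hr, List.modifyHead]
      · rw [PySem.Chars.splitOn.go]
        have hpre : ['\n'].isPrefixOf (c :: t) = false := by
          simp [List.isPrefixOf]; exact fun h' => (hc h'.symm).elim
        rw [hpre]
        simp only [if_false, Bool.false_eq_true]
        rw [ih f (c :: cur) acc (by simpa using h)]
        rw [List.splitOnP_cons]
        have hne : t.splitOnP (· == '\n') ≠ [] := List.splitOnP_ne_nil _ _
        obtain ⟨a, r, hr⟩ := List.exists_cons_of_ne_nil hne
        simp [hc, hr, List.modifyHead]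

theorem splitOn_newline (cs : List Char) :
    PySem.Chars.splitOn cs "\n".toList = cs.splitOnP (· == '\n') := by
  have hnl : "\n".toList = ['\n'] := by decide
  rw [hnl, PySem.Chars.splitOn,
    splitOn_go_newline cs (cs.length + 1) [] [] (by omega)]
  have hne := List.splitOnP_ne_nil (· == '\n') cs
  obtain ⟨a, r, hr⟩ := List.exists_cons_of_ne_nil hne
  simp [hr, List.modifyHead]

-- splitOnP has count + 1 pieces
theorem length_splitOnP (cs : List Char) :
    (cs.splitOnP (· == '\n')).length = cs.countP (· == '\n') + 1 := by
  induction cs with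
  | nil => simp [List.splitOnP_nil]
  | cons c t ih =>
    rw [List.splitOnP_cons, List.countP_cons]
    by_cases hc : c = '\n' <;> simp [hc, ih]

-- the last piece is empty iff the string ends with a newline
theorem last_splitOnP_empty (cs : List Char) (h : cs ≠ []) :
    (cs.splitOnP (· == '\n')).getLast? = some [] ↔ cs.getLast? = some '\n' := by
  induction cs with
  | nil => exact absurd rfl h
  | cons c t ih =>
    by_cases ht : t = []
    · subst ht
      by_cases hc : c = '\n' <;>
        simp [List.splitOnP_cons, List.splitOnP_nil, hc, List.modifyHead]
    · have hne : t.splitOnP (· == '\n') ≠ [] := List.splitOnP_ne_nil _ _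
      obtain ⟨a, r, hr⟩ := List.exists_cons_of_ne_nil hne
      have hlast : (c :: t).getLast? = t.getLast? := by
        obtain ⟨d, t', rfl⟩ := List.exists_cons_of_ne_nil ht
        simp [List.getLast?_cons_cons]
      rw [hlast]
      by_cases hc : c = '\n'
      · rw [List.splitOnP_cons]
        simp only [hc, BEq.rfl, if_true]
        rw [hr, List.getLast?_cons_cons, ← hr, ih ht]
      · rw [List.splitOnP_cons]
        have hcb : (c == '\n') = false := by simp [hc]
        rw [hcb]
        simp only [if_false, Bool.false_eq_true, hr, List.modifyHead]
        cases r with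
        | nil =>
          -- t has no newline at all: both sides are false
          have hcount : t.countP (· == '\n') = 0 := by
            have := length_splitOnP t
            rw [hr] at this
            simpa using this.symm
          have hnomem : '\n' ∉ t := by
            intro hm
            have := List.countP_eq_zero.mp hcount '\n' hm
            simp at this
          constructor
          · intro habs; simp at habs
          · intro hend
            obtain ⟨ys, hys⟩ := List.getLast?_eq_some_iff.mp hend
            exact absurd (by simp [hys]) hnomem
        | cons b r' =>
          rw [List.getLast?_cons_cons, ← show (a :: b :: r').getLast? = (b :: r').getLast? from
            List.getLast?_cons_cons .., ← hr, ih ht]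

-- foldl with ⊔ computes imax
theorem foldl_max_eq (ls : List (List Char)) : ∀ (a : Int), 0 ≤ a →
    ls.foldl (fun m l => max m (l.length : Int)) a = max a (imax (ls.map (fun l => (l.length : Int)))) := by
  induction ls with
  | nil => intro a ha; simp only [List.foldl_nil, imax, List.map_nil, List.foldr_nil]; omega
  | cons l t ih =>
    intro a ha
    simp only [List.foldl_cons, List.map_cons]
    rw [ih (max a (l.length : Int)) (by positivity)]
    simp only [imax, List.foldr_cons]
    omega

-- the A-side scan, characterized against splitOnP
theorem loop_spec (t : List Char) : ∀ (k m s : Int), 0 ≤ m → s ≤ k →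
    (let r := (PySem.List.enumerate t k).foldl
        (fun (acc : Int × Int) (q : Int × Char) =>
          if q.2 = '\n' then
            (if q.1 - acc.2 > acc.1 then q.1 - acc.2 else acc.1, q.1 + 1)
          else acc) (m, s)
     max r.1 ((k + (t.length : Int)) - r.2))
    = max m (imax ((k - s + ((t.splitOnP (· == '\n')).headI.length : Int)) ::
        ((t.splitOnP (· == '\n')).tail.map (fun l => (l.length : Int))))) := by
  induction t with
  | nil =>
    intro k m s hm hs
    simp only [PySem.List.enumerate_nil, List.foldl_nil, List.splitOnP_nil, List.headI,
      List.tail_cons, List.map_nil, List.length_nil, imax, List.foldr_cons, List.foldr_nil,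
      Nat.cast_zero]
    omega
  | cons c t' ih =>
    intro k m s hm hs
    have hne : t'.splitOnP (· == '\n') ≠ [] := List.splitOnP_ne_nil _ _
    obtain ⟨a, r', hr⟩ := List.exists_cons_of_ne_nil hne
    simp only [PySem.List.enumerate_cons, List.foldl_cons]
    by_cases hc : c = '\n'
    · simp only [hc, if_true, List.splitOnP_cons, BEq.rfl]
      have ihk := ih (k + 1) (if k - s > m then k - s else m) (k + 1) (by omega) (le_refl _)
      simp only [hr, List.headI, List.tail_cons, List.map_cons, List.length_cons,
        List.length_nil, imax, List.foldr_cons] at ihk ⊢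
      push_cast at ihk ⊢
      rw [show (k : Int) + (↑t'.length + 1) = (k + 1) + ↑t'.length by ring]
      rw [ihk]
      split_ifs <;> omega
    · have hcb : (c == '\n') = false := by simp [hc]
      simp only [hc, if_false, List.splitOnP_cons, hcb, Bool.false_eq_true]
      have ihk := ih (k + 1) m s hm (by omega)
      simp only [hr, List.headI, List.tail_cons, List.modifyHead,
        List.length_cons, imax, List.foldr_cons] at ihk ⊢
      push_cast at ihk ⊢
      rw [show (k : Int) + (↑t'.length + 1) = (k + 1) + ↑t'.length by ring]
      rw [ihk]
      omega

-- A's whole longest-line computation, closed against splitOnP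
theorem maxA_eq (cs : List Char) :
    (let p := (PySem.List.enumerate cs).foldl
        (fun (acc : Int × Int) (q : Int × Char) =>
          if q.2 = '\n' then
            (if q.1 - acc.2 > acc.1 then q.1 - acc.2 else acc.1, q.1 + 1)
          else acc) (0, 0)
     if (cs.length : Int) - p.2 > p.1 then (cs.length : Int) - p.2 else p.1)
    = imax ((cs.splitOnP (· == '\n')).map (fun l => (l.length : Int))) := by
  have hloop := loop_spec cs 0 0 0 (le_refl 0) (le_refl 0)
  have hne := List.splitOnP_ne_nil (· == '\n') cs
  obtain ⟨a, r, hr⟩ := List.exists_cons_of_ne_nil hne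
  have hnn : 0 ≤ imax (((a.length : Int)) :: r.map (fun l => (l.length : Int))) := imax_nonneg _
  simp only [hr, List.headI, List.tail_cons, List.map_cons, imax, List.foldr_cons] at hloop hnn ⊢
  push_cast at hloop hnn ⊢
  split_ifs <;> omega

-- ===== VERDICT (by name: the statement is the Claim_ definition above) =====
theorem size_metrics_py_spec : Claim_equal_size_metrics_py := by
  intro content _
  unfold Spec_size_metrics_py size_metrics_py size_metrics_py_alt
  by_cases hc : content = ""
  · subst hc; rfl
  · have hcs : content.toList ≠ [] := fun h0 => hc (String.toList_eq_nil_iff.mp h0)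
    have hne : (content.toList.splitOnP (· == '\n')) ≠ [] := List.splitOnP_ne_nil _ _
    have hlenS := length_splitOnP content.toList
    have hmaxA := maxA_eq content.toList
    simp only [if_neg hc, splitOn_newline, str_count_newline, PySem.Str.len_eq] at hmaxA ⊢
    by_cases hend : content.toList.getLast? = some '\n'
    · have hendT : PySem.Str.endswith content "\n" = true := (endswith_newline content).mpr hend
      have hsome : (content.toList.splitOnP (· == '\n')).getLast? = some [] :=
        (last_splitOnP_empty content.toList hcs).mpr hend
      obtain ⟨ys, hys⟩ := List.getLast?_eq_some_iff.mp hsome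
      have hcond : ((content.toList.splitOnP (· == '\n')) ≠ [] ∧
          (content.toList.splitOnP (· == '\n')).getLastD [] = []) :=
        ⟨hne, by rw [List.getLastD_eq_getLast?, hsome]; rfl⟩
      rw [if_pos hcond, if_pos hendT]
      rw [hys, List.dropLast_concat]
      have hfold := foldl_max_eq ys 0 (le_refl 0)
      have hnn := imax_nonneg (ys.map (fun l => (l.length : Int)))
      rw [hys] at hmaxA hlenS
      simp only [List.map_append, List.map_cons, List.map_nil, List.length_nil,
        Nat.cast_zero, imax_append_zero, List.length_append, List.length_cons] at hmaxA hlenS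
      simp only [List.cons.injEq, Prod.mk.injEq, and_true, true_and]
      refine ⟨?_, ?_⟩
      · rw [hmaxA, hfold]; omega
      · omega
    · have hendF : ¬ PySem.Str.endswith content "\n" = true :=
        fun h => hend ((endswith_newline content).mp h)
      have hcondF : ¬ ((content.toList.splitOnP (· == '\n')) ≠ [] ∧
          (content.toList.splitOnP (· == '\n')).getLastD [] = []) := by
        rintro ⟨-, hD⟩
        rw [List.getLastD_eq_getLast?] at hD
        cases hL : (content.toList.splitOnP (· == '\n')).getLast? with
        | none => exact hne (List.getLast?_eq_none_iff.mp hL)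
        | some l =>
          rw [hL] at hD
          simp only [Option.getD_some] at hD
          subst hD
          exact hend ((last_splitOnP_empty content.toList hcs).mp hL)
      rw [if_neg hcondF, if_neg hendF]
      have hfold := foldl_max_eq (content.toList.splitOnP (· == '\n')) 0 (le_refl 0)
      have hnn := imax_nonneg ((content.toList.splitOnP (· == '\n')).map (fun l => (l.length : Int)))
      simp only [List.cons.injEq, Prod.mk.injEq, and_true, true_and]
      refine ⟨?_, ?_⟩
      · rw [hmaxA, hfold]; omega
      · push_cast [hlenS]; omega
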